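-- pv_equiv track=rewrite | github.com/carrdelling/AdventOfCode2015 | day8/silver.py | solve
-- ===== SOURCE A (Python) =====
-- def solve(data):
--
--     solution = 0
--
--     for rule in data:
--
--         full = rule.strip()
--         clean = full[1:-1]
--         clean = clean.replace(r'\\', 'B').replace(r'\"', 'A')
--         ascii = clean.count(r'\x')
--
--         extra = len(full) - (len(clean) - (ascii*3))
--         solution += extra
--
--     return solution
-- ===== SOURCE B (Python) =====
-- def solve(data):
--     total = 0
--     for rule in data:
--         full = rule.strip()
--         content = full[1:-1]
--         bb = bq = hx = 0
--         i = 0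
--         n = len(content)
--         while i < n:
--             if i + 1 < n and content[i] == '\\':
--                 c = content[i + 1]
--                 if c == '\\':
--                     bb += 1
--                 elif c == '"':
--                     bq += 1
--                 elif c == 'x':
--                     hx += 1
--                 i += 2
--             else:
--                 i += 1
--         total += (len(full) - len(content)) + bb + bq + 3 * hx
--     return total
-- ===== Notes on version B (the rewrite author's own statement) =====
-- stated objective: alternative
-- what changed: Replaces the build-three-intermediate-strings pipeline (two .replace calls plus .count and a length arithmetic) by one left-to-right scan of the content that counts escaped backslashes, escaped quotes and hex escapes directly, adding the quote overhead as len(full)-len(content).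
import Mathlib
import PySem

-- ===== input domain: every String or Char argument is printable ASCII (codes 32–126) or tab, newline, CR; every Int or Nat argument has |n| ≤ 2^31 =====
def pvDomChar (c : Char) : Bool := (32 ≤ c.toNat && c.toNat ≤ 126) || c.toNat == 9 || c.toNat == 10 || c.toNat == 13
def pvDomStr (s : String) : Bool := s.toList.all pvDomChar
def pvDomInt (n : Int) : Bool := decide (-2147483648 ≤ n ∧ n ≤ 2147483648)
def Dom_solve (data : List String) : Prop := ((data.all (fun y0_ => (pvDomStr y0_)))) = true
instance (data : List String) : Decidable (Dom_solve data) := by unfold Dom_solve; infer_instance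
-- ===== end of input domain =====

-- B replaces A's two .replace passes plus .count by one direct scan of the stripped line's content; same value everywhere, similar cost.

-- ===== PORT A =====
def solve (data : List String) : Int :=
  data.foldl
    (fun solution rule =>
      let full := PySem.Str.strip rule
      let clean := PySem.Str.slice full (some 1) (some (-1))
      let clean2 := PySem.Str.replace (PySem.Str.replace clean "\\\\" "B") "\\\"" "A"
      let ascii : Nat := PySem.Str.count clean2 "\\x"
      let extra : Int := PySem.Str.len full - (PySem.Str.len clean2 - ((ascii : Int) * 3))
      solution + extra)
    0

-- ===== PORT B =====
-- the while-loop over the content with index i: consumes two chars at an escape, one otherwise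
def pvScanB : List Char → Int × Int × Int
  | [] => (0, 0, 0)
  | [_] => (0, 0, 0)
  | c :: d :: t =>
      if c = '\\' then
        let r := pvScanB t
        if d = '\\' then (r.1 + 1, r.2.1, r.2.2)
        else if d = '"' then (r.1, r.2.1 + 1, r.2.2)
        else if d = 'x' then (r.1, r.2.1, r.2.2 + 1)
        else r
      else pvScanB (d :: t)

def solve_alt (data : List String) : Int :=
  data.foldl
    (fun total rule =>
      let full := PySem.Str.strip rule
      let content := (PySem.Str.slice full (some 1) (some (-1))).toList
      let r := pvScanB content
      total + ((PySem.Str.len full - (content.length : Int)) + r.1 + r.2.1 + 3 * r.2.2))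
    0

-- ===== PRECONDITION & SPEC =====
def Spec_solve (data : List String) (out : Int) : Prop := out = solve_alt data
instance (data : List String) (out : Int) : Decidable (Spec_solve data out) := by unfold Spec_solve; infer_instance

-- ===== CLAIM (what is proved, stated in full; the proofs are below) =====
def Claim_equal_solve : Prop := ∀ (data : List String), Dom_solve data → Spec_solve data (solve data)

-- ===== LEMMAS AND PROOFS =====

-- structural characterisation of  s.replace('\' + q, r)  for a two-char pattern starting with a backslash
def pvRep (q r : Char) : List Char → List Char
  | [] => []
  | [c] => [c]
  | c :: d :: t => if c = '\\' ∧ d = q then r :: pvRep q r t else c :: pvRep q r (d :: t)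

-- structural characterisation of  s.count('\x')
def pvCnt : List Char → Nat
  | [] => 0
  | [_] => 0
  | c :: d :: t => if c = '\\' ∧ d = 'x' then pvCnt t + 1 else pvCnt (d :: t)

theorem pvRep_go (q r : Char) : ∀ (fuel : Nat) (l acc : List Char), l.length ≤ fuel →
    PySem.Chars.replace.go ['\\', q] [r] fuel l acc = acc.reverse ++ pvRep q r l := by
  intro fuel
  induction fuel with
  | zero =>
      intro l acc h
      have : l = [] := List.length_eq_zero_iff.mp (Nat.le_zero.mp h)
      subst this
      simp [PySem.Chars.replace.go, pvRep]
  | succ n ih =>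
      intro l acc h
      match l with
      | [] => simp [PySem.Chars.replace.go, pvRep]
      | [c] =>
          have hpre : (['\\', q] : List Char).isPrefixOf [c] = false := by
            simp [List.isPrefixOf]
          have hgo : PySem.Chars.replace.go ['\\', q] [r] (n + 1) [c] acc
              = PySem.Chars.replace.go ['\\', q] [r] n [] (c :: acc) := by
            simp [PySem.Chars.replace.go, hpre]
          rw [hgo, ih [] (c :: acc) (by simp)]
          simp [pvRep]
      | c :: d :: t =>
          simp only [List.length_cons] at h
          by_cases hcd : c = '\\' ∧ d = q
          · obtain ⟨hc, hd⟩ := hcd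
            subst hc; subst hd
            have hpre : (['\\', d] : List Char).isPrefixOf ('\\' :: d :: t) = true := by
              simp [List.isPrefixOf]
            have hgo : PySem.Chars.replace.go ['\\', d] [r] (n + 1) ('\\' :: d :: t) acc
                = PySem.Chars.replace.go ['\\', d] [r] n t (r :: acc) := by
              simp [PySem.Chars.replace.go, hpre]
            rw [hgo, ih t (r :: acc) (by omega)]
            simp [pvRep]
          · have hpre : (['\\', q] : List Char).isPrefixOf (c :: d :: t) = false := by
              by_contra hco
              have h2 : (['\\', q] : List Char).isPrefixOf (c :: d :: t) = true := by
                revert hco; cases (['\\', q] : List Char).isPrefixOf (c :: d :: t) <;> simp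
              simp [List.isPrefixOf] at h2
              exact hcd ⟨h2.1.symm, h2.2.symm⟩
            have hgo : PySem.Chars.replace.go ['\\', q] [r] (n + 1) (c :: d :: t) acc
                = PySem.Chars.replace.go ['\\', q] [r] n (d :: t) (c :: acc) := by
              simp [PySem.Chars.replace.go, hpre]
            rw [hgo, ih (d :: t) (c :: acc) (by simp; omega)]
            simp [pvRep, hcd]

theorem pvRep_eq (q r : Char) (cs : List Char) :
    PySem.Chars.replace cs ['\\', q] [r] = pvRep q r cs := by
  have : (['\\', q] : List Char).isEmpty = false := rfl
  simp only [PySem.Chars.replace, this, Bool.false_eq_true, if_false]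
  simpa using pvRep_go q r cs.length cs [] (le_refl _)

theorem pvCnt_go : ∀ (fuel : Nat) (l : List Char) (acc : Nat), l.length ≤ fuel →
    PySem.Chars.count.go ['\\', 'x'] fuel l acc = acc + pvCnt l := by
  intro fuel
  induction fuel with
  | zero =>
      intro l acc h
      have : l = [] := List.length_eq_zero_iff.mp (Nat.le_zero.mp h)
      subst this
      simp [PySem.Chars.count.go, pvCnt]
  | succ n ih =>
      intro l acc h
      match l with
      | [] => simp [PySem.Chars.count.go, pvCnt]
      | [c] =>
          have hpre : (['\\', 'x'] : List Char).isPrefixOf [c] = false := by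
            simp [List.isPrefixOf]
          have hgo : PySem.Chars.count.go ['\\', 'x'] (n + 1) [c] acc
              = PySem.Chars.count.go ['\\', 'x'] n [] acc := by
            simp [PySem.Chars.count.go, hpre]
          rw [hgo, ih [] acc (by simp)]
          simp [pvCnt]
      | c :: d :: t =>
          simp only [List.length_cons] at h
          by_cases hcd : c = '\\' ∧ d = 'x'
          · obtain ⟨hc, hd⟩ := hcd
            subst hc; subst hd
            have hpre : (['\\', 'x'] : List Char).isPrefixOf ('\\' :: 'x' :: t) = true := by
              simp [List.isPrefixOf]
            have hgo : PySem.Chars.count.go ['\\', 'x'] (n + 1) ('\\' :: 'x' :: t) acc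
                = PySem.Chars.count.go ['\\', 'x'] n t (acc + 1) := by
              simp [PySem.Chars.count.go, hpre]
            rw [hgo, ih t (acc + 1) (by omega)]
            simp [pvCnt]
            omega
          · have hpre : (['\\', 'x'] : List Char).isPrefixOf (c :: d :: t) = false := by
              by_contra hco
              have h2 : (['\\', 'x'] : List Char).isPrefixOf (c :: d :: t) = true := by
                revert hco; cases (['\\', 'x'] : List Char).isPrefixOf (c :: d :: t) <;> simp
              simp [List.isPrefixOf] at h2
              exact hcd ⟨h2.1.symm, h2.2.symm⟩
            have hgo : PySem.Chars.count.go ['\\', 'x'] (n + 1) (c :: d :: t) acc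
                = PySem.Chars.count.go ['\\', 'x'] n (d :: t) acc := by
              simp [PySem.Chars.count.go, hpre]
            rw [hgo, ih (d :: t) acc (by simp; omega)]
            simp [pvCnt, hcd]

theorem pvCnt_eq (cs : List Char) : PySem.Chars.count cs ['\\', 'x'] = pvCnt cs := by
  have : (['\\', 'x'] : List Char).isEmpty = false := rfl
  simp only [PySem.Chars.count, this, Bool.false_eq_true, if_false]
  simpa using pvCnt_go cs.length cs 0 (le_refl _)

-- pass-through of a non-backslash head
theorem pvRep_cons (q r : Char) (c : Char) (w : List Char) (hc : c ≠ '\\') :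
    pvRep q r (c :: w) = c :: pvRep q r w := by
  cases w with
  | nil => simp [pvRep]
  | cons d t => simp [pvRep, hc]

theorem pvCnt_cons (c : Char) (w : List Char) (hc : c ≠ '\\') :
    pvCnt (c :: w) = pvCnt w := by
  cases w with
  | nil => simp [pvCnt]
  | cons d t => simp [pvCnt, hc]

-- the per-content identity: length after both replaces, minus 3·(count of '\x'), equals
-- the original length minus (bb + bq + 3·hx) of the scan
theorem pv_main : ∀ (n : Nat) (cs : List Char), cs.length ≤ n →
    ((pvRep '"' 'A' (pvRep '\\' 'B' cs)).length : Int)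
        - 3 * (pvCnt (pvRep '"' 'A' (pvRep '\\' 'B' cs)) : Int)
      = (cs.length : Int) - ((pvScanB cs).1 + (pvScanB cs).2.1 + 3 * (pvScanB cs).2.2) := by
  intro n
  induction n with
  | zero =>
      intro cs h
      have : cs = [] := List.length_eq_zero_iff.mp (Nat.le_zero.mp h)
      subst this
      simp [pvRep, pvCnt, pvScanB]
  | succ n ih =>
      intro cs h
      match cs with
      | [] => simp [pvRep, pvCnt, pvScanB]
      | [c] => simp [pvRep, pvCnt, pvScanB]
      | c :: d :: t =>
          simp only [List.length_cons] at h
          by_cases hc : c = '\\'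
          · subst hc
            have iht := ih t (by omega)
            by_cases hd : d = '\\'
            · subst hd
              have e1 : pvRep '\\' 'B' ('\\' :: '\\' :: t) = 'B' :: pvRep '\\' 'B' t := by
                simp [pvRep]
              have e2 : pvRep '"' 'A' ('B' :: pvRep '\\' 'B' t)
                  = 'B' :: pvRep '"' 'A' (pvRep '\\' 'B' t) := pvRep_cons _ _ _ _ (by decide)
              have e3 : pvScanB ('\\' :: '\\' :: t)
                  = ((pvScanB t).1 + 1, (pvScanB t).2.1, (pvScanB t).2.2) := by
                simp [pvScanB]
              rw [e1, e2, pvCnt_cons _ _ (by decide), e3]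
              simp only [List.length_cons] at iht ⊢
              push_cast at iht ⊢
              omega
            · have e1 : pvRep '\\' 'B' ('\\' :: d :: t) = '\\' :: d :: pvRep '\\' 'B' t := by
                rw [show pvRep '\\' 'B' ('\\' :: d :: t) = '\\' :: pvRep '\\' 'B' (d :: t) by
                      simp [pvRep, hd],
                    pvRep_cons _ _ _ _ (by simpa using hd)]
              by_cases hq : d = '"'
              · subst hq
                have e2 : pvRep '"' 'A' ('\\' :: '"' :: pvRep '\\' 'B' t)
                    = 'A' :: pvRep '"' 'A' (pvRep '\\' 'B' t) := by simp [pvRep]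
                have e3 : pvScanB ('\\' :: '"' :: t)
                    = ((pvScanB t).1, (pvScanB t).2.1 + 1, (pvScanB t).2.2) := by
                  simp [pvScanB]
                rw [e1, e2, pvCnt_cons _ _ (by decide), e3]
                simp only [List.length_cons] at iht ⊢
                push_cast at iht ⊢
                omega
              · have e2 : pvRep '"' 'A' ('\\' :: d :: pvRep '\\' 'B' t)
                    = '\\' :: d :: pvRep '"' 'A' (pvRep '\\' 'B' t) := by
                  rw [show pvRep '"' 'A' ('\\' :: d :: pvRep '\\' 'B' t)
                        = '\\' :: pvRep '"' 'A' (d :: pvRep '\\' 'B' t) by simp [pvRep, hq],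
                      pvRep_cons _ _ _ _ (by simpa using hd)]
                by_cases hx : d = 'x'
                · subst hx
                  have e3 : pvCnt ('\\' :: 'x' :: pvRep '"' 'A' (pvRep '\\' 'B' t))
                      = pvCnt (pvRep '"' 'A' (pvRep '\\' 'B' t)) + 1 := by simp [pvCnt]
                  have e4 : pvScanB ('\\' :: 'x' :: t)
                      = ((pvScanB t).1, (pvScanB t).2.1, (pvScanB t).2.2 + 1) := by
                    simp [pvScanB]
                  rw [e1, e2, e3, e4]
                  simp only [List.length_cons] at iht ⊢
                  push_cast at iht ⊢
                  omega
                · have e3 : pvCnt ('\\' :: d :: pvRep '"' 'A' (pvRep '\\' 'B' t))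
                      = pvCnt (pvRep '"' 'A' (pvRep '\\' 'B' t)) := by
                    rw [show pvCnt ('\\' :: d :: pvRep '"' 'A' (pvRep '\\' 'B' t))
                          = pvCnt (d :: pvRep '"' 'A' (pvRep '\\' 'B' t)) by simp [pvCnt, hx],
                        pvCnt_cons _ _ (by simpa using hd)]
                  have e4 : pvScanB ('\\' :: d :: t) = pvScanB t := by
                    simp [pvScanB, hd, hq, hx]
                  rw [e1, e2, e3, e4]
                  simp only [List.length_cons] at iht ⊢
                  push_cast at iht ⊢
                  omega
          · have ihdt := ih (d :: t) (by simp; omega)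
            have e1 : pvRep '\\' 'B' (c :: d :: t) = c :: pvRep '\\' 'B' (d :: t) := by
              simp [pvRep, hc]
            have e2 : pvRep '"' 'A' (c :: pvRep '\\' 'B' (d :: t))
                = c :: pvRep '"' 'A' (pvRep '\\' 'B' (d :: t)) := pvRep_cons _ _ _ _ hc
            have e4 : pvScanB (c :: d :: t) = pvScanB (d :: t) := by simp [pvScanB, hc]
            rw [e1, e2, pvCnt_cons _ _ hc, e4]
            simp only [List.length_cons] at ihdt ⊢
            push_cast at ihdt ⊢
            omega

-- the per-rule values agree
theorem pv_rule (acc : Int) (rule : String) :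
    (let full := PySem.Str.strip rule
     let clean := PySem.Str.slice full (some 1) (some (-1))
     let clean2 := PySem.Str.replace (PySem.Str.replace clean "\\\\" "B") "\\\"" "A"
     let ascii : Nat := PySem.Str.count clean2 "\\x"
     let extra : Int := PySem.Str.len full - (PySem.Str.len clean2 - ((ascii : Int) * 3))
     acc + extra)
    = (let full := PySem.Str.strip rule
       let content := (PySem.Str.slice full (some 1) (some (-1))).toList
       let r := pvScanB content
       acc + ((PySem.Str.len full - (content.length : Int)) + r.1 + r.2.1 + 3 * r.2.2)) := by
  simp only [PySem.Str.len_eq, PySem.Str.count_eq, PySem.Str.toList_replace]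
  rw [show ("\\\\" : String).toList = ['\\', '\\'] from rfl,
      show ("B" : String).toList = ['B'] from rfl,
      show ("\\\"" : String).toList = ['\\', '"'] from rfl,
      show ("A" : String).toList = ['A'] from rfl,
      show ("\\x" : String).toList = ['\\', 'x'] from rfl,
      pvRep_eq, pvRep_eq, pvCnt_eq]
  have h := pv_main ((PySem.Str.slice (PySem.Str.strip rule) (some 1) (some (-1))).toList.length)
      ((PySem.Str.slice (PySem.Str.strip rule) (some 1) (some (-1))).toList) (le_refl _)
  omega

theorem pv_rule_fun :
    (fun (solution : Int) (rule : String) =>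
      let full := PySem.Str.strip rule
      let clean := PySem.Str.slice full (some 1) (some (-1))
      let clean2 := PySem.Str.replace (PySem.Str.replace clean "\\\\" "B") "\\\"" "A"
      let ascii : Nat := PySem.Str.count clean2 "\\x"
      let extra : Int := PySem.Str.len full - (PySem.Str.len clean2 - ((ascii : Int) * 3))
      solution + extra)
    = (fun (total : Int) (rule : String) =>
      let full := PySem.Str.strip rule
      let content := (PySem.Str.slice full (some 1) (some (-1))).toList
      let r := pvScanB content
      total + ((PySem.Str.len full - (content.length : Int)) + r.1 + r.2.1 + 3 * r.2.2)) := by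
  funext acc rule
  exact pv_rule acc rule

theorem solve_spec' : ∀ (data : List String), solve data = solve_alt data := by
  intro data
  unfold solve solve_alt
  rw [pv_rule_fun]

-- ===== VERDICT (by name: the statement is the Claim_ definition above) =====
theorem solve_spec : Claim_equal_solve := by
  intro data _
  unfold Spec_solve
  exact solve_spec' data
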